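-- pv_equiv track=rewrite | github.com/coreyhsu1013/agent-mesh | src/orchestrator/react_loop.py | _extract_errors
-- ===== SOURCE A (Python) =====
-- def _extract_errors(output: str, max_lines: int = 20) -> str:
--     if not output:
--         return ""
--     error_keywords = ["error", "Error", "ERROR", "FAIL", "fail", "TypeError",
--                       "SyntaxError", "ReferenceError", "Cannot find", "not found",
--                       "Module not found", "TS2", "TS7"]
--     lines = output.split("\n")
--     error_lines = []
--     for i, line in enumerate(lines):
--         if any(kw in line for kw in error_keywords):
--             start = max(0, i - 1)
--             end = min(len(lines), i + 3)
--             for ctx_line in lines[start:end]: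
--                 if ctx_line.strip() and ctx_line not in error_lines:
--                     error_lines.append(ctx_line)
--         if len(error_lines) >= max_lines:
--             break
--     return "\n".join(error_lines[:max_lines])
-- ===== SOURCE B (Python) =====
-- def _extract_errors(output: str, max_lines: int = 20) -> str:
--     if not output:
--         return ""
--     error_keywords = ["error", "Error", "ERROR", "FAIL", "fail", "TypeError",
--                       "SyntaxError", "ReferenceError", "Cannot find", "not found",
--                       "Module not found", "TS2", "TS7"]
--     lines = output.split("\n")
--     # pass 1: index table of the lines that contain a keyword
--     matched = {i for i, line in enumerate(lines)
--                if any(kw in line for kw in error_keywords)}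
--     # pass 2: one ordered scan; line j lies in some context window iff a match
--     # exists among indices j-2 .. j+1 (window of match i is [i-1, i+3))
--     error_lines = []
--     for j, line in enumerate(lines):
--         if len(error_lines) >= max_lines:
--             break
--         if line.strip() and line not in error_lines \
--                 and not matched.isdisjoint(range(j - 2, j + 2)):
--             error_lines.append(line)
--     return "\n".join(error_lines)
-- ===== Notes on version B (the rewrite author's own statement) =====
-- stated objective: alternative
-- what changed: Replaces A's per-match context-window expansion (nested loop appending each match's window slice) by two passes: first a match-index table, then one ordered scan over all lines keeping each nonempty unseen line whose index lies within distance 2/1 of a match (correct because the windows are intervals with monotone endpoints, so the deduplicated concatenation of the windows enumerates their union in index order); …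
-- outside the precondition, e.g. on _extract_errors('error\nmore', -1): A returns 'error', B returns ''
import Mathlib
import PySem

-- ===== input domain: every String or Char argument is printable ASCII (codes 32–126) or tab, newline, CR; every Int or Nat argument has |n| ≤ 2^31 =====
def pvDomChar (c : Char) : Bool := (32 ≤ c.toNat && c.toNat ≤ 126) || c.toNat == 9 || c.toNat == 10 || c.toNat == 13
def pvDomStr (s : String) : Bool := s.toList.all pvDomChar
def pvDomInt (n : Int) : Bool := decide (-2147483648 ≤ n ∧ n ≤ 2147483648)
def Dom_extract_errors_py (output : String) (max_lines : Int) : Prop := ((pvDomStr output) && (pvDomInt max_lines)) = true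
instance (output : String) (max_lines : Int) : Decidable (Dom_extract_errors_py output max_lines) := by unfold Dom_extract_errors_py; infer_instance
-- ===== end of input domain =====

-- B replaces A's per-match window expansion by two passes: a match-index table, then one
-- ordered scan keeping each line whose index is near a match; objective: alternative.

-- output.split("\n")  (exact: Chars.splitOn is Python's str.split with nonempty sep)
def pvSplit (s : String) : List String :=
  (PySem.Chars.splitOn s.toList ['\n']).map (fun cs => String.ofList cs)

-- the keyword test, the same expression in both Pythons
def pvKeywords : List String := ["error", "Error", "ERROR", "FAIL", "fail", "TypeError",
  "SyntaxError", "ReferenceError", "Cannot find", "not found",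
  "Module not found", "TS2", "TS7"]

def pvMatch (line : String) : Bool := pvKeywords.any (fun kw => PySem.Str.isIn kw line)

-- ===== PORT A =====
-- lines[max(0, i-1) : min(len(lines), i+3)]
def pvWindow (lines : List String) (i : Nat) : List String :=
  PySem.List.slice lines (some (max 0 ((i : Int) - 1))) (some (min (lines.length : Int) ((i : Int) + 3)))

def aGo (lines : List String) (maxl : Int) (i : Nat) (acc : List String) : List String :=
  if h : i < lines.length then
    let line := lines[i]
    let acc' := if pvMatch line then
        (pvWindow lines i).foldl
          (fun a c => if PySem.Str.strip c ≠ "" ∧ c ∉ a then a ++ [c] else a) acc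
      else acc
    if (acc'.length : Int) ≥ maxl then acc' else aGo lines maxl (i + 1) acc'
  else acc
termination_by lines.length - i

def extract_errors_py (output : String) (max_lines : Int) : String :=
  if output = "" then ""
  else
    let lines := pvSplit output
    PySem.Str.join "\n" (PySem.List.slice (aGo lines max_lines 0 []) none (some max_lines))

-- ===== PORT B =====
-- matched = {i for i, line in enumerate(lines) if any(kw in line for kw in error_keywords)}
def bMatched (lines : List String) : List Int :=
  PySem.Set.ofList ((PySem.List.enumerate lines 0).filterMap
    (fun p => if pvMatch p.2 then some p.1 else none))

-- not matched.isdisjoint(range(j - 2, j + 2))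
def bHit (matched : List Int) (j : Nat) : Bool :=
  !(PySem.Set.isdisjoint matched (PySem.List.pyRange ((j : Int) - 2) ((j : Int) + 2) 1))

-- the single ordered scan with the early break at the cap
def bGo (lines : List String) (maxl : Int) (matched : List Int) (j : Nat) (acc : List String) : List String :=
  if h : j < lines.length then
    if (acc.length : Int) ≥ maxl then acc
    else
      let line := lines[j]
      let acc' := if PySem.Str.strip line ≠ "" ∧ line ∉ acc ∧ bHit matched j then acc ++ [line] else acc
      bGo lines maxl matched (j + 1) acc'
  else acc
termination_by lines.length - j

def extract_errors_py_alt (output : String) (max_lines : Int) : String :=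
  if output = "" then ""
  else
    let lines := pvSplit output
    PySem.Str.join "\n" (bGo lines max_lines (bMatched lines) 0 [])

-- ===== PRECONDITION & SPEC =====
-- Pre_ excludes only max_lines = -1 or -2 combined with a keyword match on the very first line, a
-- cap outside the function's natural domain: there A absorbs the first line's window, breaks out
-- and applies a negative end-slice to it, an unspecified corner where A's sliced value and B's
-- empty string are both defensible (everywhere else, negative caps included, A and B are proved equal).
def Pre_extract_errors_py (output : String) (max_lines : Int) : Prop :=
  0 ≤ max_lines ∨ max_lines ≤ -3 ∨ pvMatch ((pvSplit output).headD "") = false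
instance (output : String) (max_lines : Int) : Decidable (Pre_extract_errors_py output max_lines) := by
  unfold Pre_extract_errors_py; infer_instance

def pvWitness_extract_errors_py : String × Int := ("a\nerror x\nb", 20)

def Spec_extract_errors_py (output : String) (max_lines : Int) (out : String) : Prop := out = extract_errors_py_alt output max_lines
instance (output : String) (max_lines : Int) (out : String) : Decidable (Spec_extract_errors_py output max_lines out) := by unfold Spec_extract_errors_py; infer_instance

-- ===== CLAIM (what is proved, stated in full; the proofs are below) =====
def Claim_equal_extract_errors_py : Prop := ∀ (output : String) (max_lines : Int), Dom_extract_errors_py output max_lines → Pre_extract_errors_py output max_lines → Spec_extract_errors_py output max_lines (extract_errors_py output max_lines)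

-- ===== LEMMAS AND PROOFS =====

-- ---------- ghost vocabulary over a fixed line list ----------
def getB (lines : List String) (k : Nat) : String := lines.getD k ""
def mB (lines : List String) (i : Nat) : Bool := pvMatch (lines.getD i "")
def hiB (lines : List String) (i : Nat) : Nat := min lines.length (i + 3)
def ivalB (lines : List String) (i : Nat) : List Nat := List.range' (i - 1) (hiB lines i - (i - 1))
def idxFrom (lines : List String) (i : Nat) : List Nat :=
  (List.range' i (lines.length - i)).flatMap (fun k => if mB lines k then ivalB lines k else [])
def covB (lines : List String) (t j : Nat) : Bool :=
  (List.range t).any (fun i => mB lines i && decide (i - 1 ≤ j) && decide (j < hiB lines i))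
def HmB (lines : List String) (i : Nat) : Nat :=
  ((List.range i).filter (mB lines)).foldr (fun k r => max (hiB lines k) r) 0
def qIB (lines : List String) (k : Nat) : Bool := decide (PySem.Str.strip (lines.getD k "") ≠ "")

-- A's candidate stream (ghost): window per match, strip-filtered
def aStr (all : List String) (i : Nat) : List String → List String
  | [] => []
  | line :: rest =>
      (if pvMatch line then (pvWindow all i).filter (fun c => PySem.Str.strip c ≠ "") else [])
        ++ aStr all (i + 1) rest

-- B's candidate stream (ghost)
def tStr (lines : List String) (matched : List Int) (j : Nat) : List String :=
  ((List.range' j (lines.length - j)).filter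
      (fun k => qIB lines k && bHit matched k)).map (getB lines)

-- ---------- A-side: the loop is capped dedup of aStr ----------
theorem aFold_eq_update (w acc : List String) :
    w.foldl (fun a c => if PySem.Str.strip c ≠ "" ∧ c ∉ a then a ++ [c] else a) acc
      = PySem.Set.update acc (w.filter (fun c => PySem.Str.strip c ≠ "")) := by
  induction w generalizing acc with
  | nil => simp [PySem.Set.update]
  | cons c w ih =>
      by_cases hs : PySem.Str.strip c ≠ ""
      · rw [List.foldl_cons, ih]
        simp [PySem.Set.update, PySem.Set.add, PySem.Set.contains_eq_listContains, hs,
          List.contains_eq_mem]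
      · simp only [ne_eq, not_not] at hs
        simp [hs, ih]

theorem take_update_of_le (acc xs : List String) (m : Nat) (h : m ≤ acc.length) :
    (PySem.Set.update acc xs).take m = acc.take m := by
  rw [PySem.Set.update_eq_append_filter]
  rw [List.take_append_of_le_length h]

theorem aStr_drop_step (lines : List String) (i : Nat) (h : i < lines.length) :
    aStr lines i (lines.drop i)
      = (if pvMatch lines[i] then (pvWindow lines i).filter (fun c => PySem.Str.strip c ≠ "") else [])
        ++ aStr lines (i + 1) (lines.drop (i + 1)) := by
  rw [List.drop_eq_getElem_cons h]
  rfl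

theorem main_inv (lines : List String) (maxl : Int) (i : Nat) (acc : List String)
    (hacc : (acc.length : Int) < maxl) :
    (aGo lines maxl i acc).take maxl.toNat
      = (PySem.Set.update acc (aStr lines i (lines.drop i))).take maxl.toNat := by
  by_cases h : i < lines.length
  · rw [aStr_drop_step lines i h]
    rw [aGo, dif_pos h]
    simp only []
    by_cases hm : pvMatch lines[i]
    · rw [if_pos hm, if_pos hm, aFold_eq_update, PySem.Set.update_append]
      set acc' := PySem.Set.update acc ((pvWindow lines i).filter (fun c => PySem.Str.strip c ≠ "")) with hacc'
      by_cases hlen : (acc'.length : Int) ≥ maxl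
      · rw [if_pos hlen,
          take_update_of_le acc' (aStr lines (i + 1) (lines.drop (i + 1))) maxl.toNat (by omega)]
      · rw [if_neg hlen]
        exact main_inv lines maxl (i + 1) acc' (by omega)
    · rw [if_neg hm, if_neg hm, List.nil_append,
        if_neg (show ¬ ((acc.length : Int) ≥ maxl) by omega)]
      exact main_inv lines maxl (i + 1) acc hacc
  · rw [List.drop_eq_nil_of_le (by omega), aGo, dif_neg h]
    simp [aStr, PySem.Set.update]
termination_by lines.length - i

-- ---------- generic dedup lemmas via `news` ----------
def news {α : Type} [DecidableEq α] (s : List α) : List α → List α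
  | [] => []
  | x :: xs => if x ∈ s then news s xs else x :: news (s ++ [x]) xs

theorem add_of_mem {α : Type} [DecidableEq α] (s : List α) (x : α) (h : x ∈ s) :
    PySem.Set.add s x = s := by
  simp [PySem.Set.add, List.contains_eq_mem, h]

theorem add_of_not_mem {α : Type} [DecidableEq α] (s : List α) (x : α) (h : x ∉ s) :
    PySem.Set.add s x = s ++ [x] := by
  simp [PySem.Set.add, List.contains_eq_mem, h]

theorem update_eq_append_news {α : Type} [DecidableEq α] (l : List α) : ∀ (s : List α),
    PySem.Set.update s l = s ++ news s l := by
  induction l with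
  | nil => intro s; simp [news, PySem.Set.update]
  | cons x xs ih =>
      intro s
      rw [PySem.Set.update_cons, news]
      by_cases h : x ∈ s
      · rw [if_pos h, add_of_mem s x h, ih]
      · rw [if_neg h, add_of_not_mem s x h, ih, List.append_assoc]
        rfl

theorem ofList_eq_news {α : Type} [DecidableEq α] (l : List α) :
    PySem.Set.ofList l = news [] l := by
  have := update_eq_append_news l []
  simpa [PySem.Set.update_empty] using this

theorem news_map {α β : Type} [DecidableEq α] [DecidableEq β] (f : α → β) :
    ∀ (l : List α) (sa : List α) (sb : List β), (∀ x ∈ sa, f x ∈ sb) →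
      PySem.Set.update sb ((news sa l).map f) = PySem.Set.update sb (l.map f) := by
  intro l
  induction l with
  | nil => intro sa sb _; rfl
  | cons x xs ih =>
      intro sa sb hsub
      rw [List.map_cons, PySem.Set.update_cons, news]
      by_cases h : x ∈ sa
      · rw [if_pos h, add_of_mem sb (f x) (hsub x h)]
        exact ih sa sb hsub
      · rw [if_neg h, List.map_cons, PySem.Set.update_cons]
        refine ih (sa ++ [x]) (PySem.Set.add sb (f x)) ?_
        intro y hy
        rcases List.mem_append.mp hy with hy | hy
        · exact (PySem.Set.mem_add _ _ _).mpr (Or.inl (hsub y hy))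
        · simp at hy; subst hy
          exact (PySem.Set.mem_add _ _ _).mpr (Or.inr rfl)

theorem ofList_map_ofList {α β : Type} [DecidableEq α] [DecidableEq β] (f : α → β) (l : List α) :
    PySem.Set.ofList ((PySem.Set.ofList l).map f) = PySem.Set.ofList (l.map f) := by
  rw [ofList_eq_news l, ← PySem.Set.update_empty ((news [] l).map f),
    ← PySem.Set.update_empty (l.map f)]
  exact news_map f l [] [] (by simp)

theorem news_filter {α : Type} [DecidableEq α] (p : α → Bool) :
    ∀ (l s t : List α), (∀ x, p x = true → (x ∈ s ↔ x ∈ t)) →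
      news t (l.filter p) = (news s l).filter p := by
  intro l
  induction l with
  | nil => intro s t _; rfl
  | cons x xs ih =>
      intro s t hst
      by_cases hp : p x = true
      · rw [List.filter_cons_of_pos hp, news, news]
        by_cases h : x ∈ s
        · rw [if_pos h, if_pos ((hst x hp).mp h)]
          exact ih s t hst
        · rw [if_neg h, if_neg (fun hc => h ((hst x hp).mpr hc)),
            List.filter_cons_of_pos hp]
          congr 1
          refine ih (s ++ [x]) (t ++ [x]) ?_
          intro y hy
          constructor
          · intro hm; rcases List.mem_append.mp hm with hm | hm
            · exact List.mem_append.mpr (Or.inl ((hst y hy).mp hm))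
            · exact List.mem_append.mpr (Or.inr hm)
          · intro hm; rcases List.mem_append.mp hm with hm | hm
            · exact List.mem_append.mpr (Or.inl ((hst y hy).mpr hm))
            · exact List.mem_append.mpr (Or.inr hm)
      · rw [List.filter_cons_of_neg (by simpa using hp), news]
        by_cases h : x ∈ s
        · rw [if_pos h]; exact ih s t hst
        · rw [if_neg h, List.filter_cons_of_neg (by simpa using hp)]
          refine ih (s ++ [x]) t ?_
          intro y hy
          have hyx : y ≠ x := fun he => hp (he ▸ hy)
          rw [← hst y hy]
          simp [hyx]

theorem ofList_filter {α : Type} [DecidableEq α] (p : α → Bool) (l : List α) :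
    PySem.Set.ofList (l.filter p) = (PySem.Set.ofList l).filter p := by
  rw [ofList_eq_news, ofList_eq_news]
  exact news_filter p l [] [] (by simp)

theorem update_of_forall_mem {α : Type} [DecidableEq α] (l : List α) : ∀ (s : List α),
    (∀ x ∈ l, x ∈ s) → PySem.Set.update s l = s := by
  induction l with
  | nil => intro s _; rfl
  | cons x xs ih =>
      intro s h
      rw [PySem.Set.update_cons, add_of_mem s x (h x (by simp))]
      exact ih s (fun y hy => h y (by simp [hy]))

-- ---------- the window/stream correspondence ----------
theorem dropTake_eq_map_range' (lines : List String) (a b : Nat) (h : a + b ≤ lines.length) :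
    (lines.drop a).take b = (List.range' a b).map (getB lines) := by
  apply List.ext_getElem
  · simp; omega
  · intro i h1 h2
    simp only [List.getElem_take, List.getElem_drop, List.getElem_map, List.getElem_range']
    have : a + i < lines.length := by simp at h1; omega
    simp [getB, List.getD_eq_getElem?_getD, List.getElem?_eq_getElem this]

theorem window_eq_map (lines : List String) (k : Nat) (h : k < lines.length) :
    pvWindow lines k = (ivalB lines k).map (getB lines) := by
  unfold pvWindow ivalB
  have h1 : max 0 ((k : Int) - 1) = ((k - 1 : Nat) : Int) := by omega
  have h2 : min (lines.length : Int) ((k : Int) + 3) = ((hiB lines k : Nat) : Int) := by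
    unfold hiB; omega
  rw [h1, h2, PySem.List.slice_natCast]
  exact dropTake_eq_map_range' lines (k - 1) (hiB lines k - (k - 1)) (by unfold hiB; omega)

theorem getD_eq_getElem' (lines : List String) (i : Nat) (h : i < lines.length) :
    lines.getD i "" = lines[i] := by
  simp [List.getD_eq_getElem?_getD, List.getElem?_eq_getElem h]

theorem aStr_eq_idx (lines : List String) (i : Nat) :
    aStr lines i (lines.drop i) = ((idxFrom lines i).filter (qIB lines)).map (getB lines) := by
  by_cases h : i < lines.length
  · have hn : lines.length - i = (lines.length - (i + 1)) + 1 := by omega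
    rw [aStr_drop_step lines i h]
    unfold idxFrom
    rw [hn, List.range'_succ, List.flatMap_cons, List.filter_append, List.map_append]
    have hrec := aStr_eq_idx lines (i + 1)
    unfold idxFrom at hrec
    rw [hrec]
    congr 1
    have hm : mB lines i = pvMatch lines[i] := by
      unfold mB; rw [getD_eq_getElem' lines i h]
    by_cases hmi : pvMatch lines[i]
    · rw [if_pos hmi, if_pos (hm.trans (by rw [hmi]) : mB lines i = true),
        window_eq_map lines i h, List.filter_map]
      rfl
    · rw [if_neg hmi, if_neg (by rw [hm]; exact hmi)]
      rfl
  · rw [List.drop_eq_nil_of_le (by omega)]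
    unfold idxFrom
    rw [Nat.sub_eq_zero_of_le (by omega)]
    rfl
termination_by lines.length - i

-- ---------- B-side: the scan is capped dedup of tStr ----------
theorem bGo_inv (lines : List String) (maxl : Int) (matched : List Int) (j : Nat)
    (acc : List String) (hle : acc.length ≤ maxl.toNat) (h0 : 0 ≤ maxl) :
    bGo lines maxl matched j acc
      = (PySem.Set.update acc (tStr lines matched j)).take maxl.toNat := by
  by_cases h : j < lines.length
  · rw [bGo, dif_pos h]
    have hn : lines.length - j = (lines.length - (j + 1)) + 1 := by omega
    have hts : tStr lines matched j
        = (if (qIB lines j && bHit matched j) = true then [getB lines j] else [])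
          ++ tStr lines matched (j + 1) := by
      unfold tStr
      rw [hn, List.range'_succ, List.filter_cons]
      split_ifs with hp
      · simp
      · simp
    by_cases hcap : (acc.length : Int) ≥ maxl
    · rw [if_pos hcap, take_update_of_le acc _ maxl.toNat (by omega),
        List.take_of_length_le hle]
    · rw [if_neg hcap]
      simp only []
      rw [hts, PySem.Set.update_append]
      have hget : getB lines j = lines[j] := getD_eq_getElem' lines j h
      by_cases hk : (qIB lines j && bHit matched j) = true
      · rw [if_pos hk]
        have hq : PySem.Str.strip lines[j] ≠ "" := by
          have hk2 : qIB lines j = true ∧ bHit matched j = true := by simpa using hk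
          have := hk2.1
          unfold qIB at this
          rw [getD_eq_getElem' lines j h] at this
          exact of_decide_eq_true this
        have hb : bHit matched j = true := by
          have hk2 : qIB lines j = true ∧ bHit matched j = true := by simpa using hk
          exact hk2.2
        have hupd : PySem.Set.update acc [getB lines j] = PySem.Set.add acc lines[j] := by
          rw [hget]; rfl
        rw [hupd]
        by_cases hmem : lines[j] ∈ acc
        · rw [if_neg (by simp [hmem]), add_of_mem acc _ hmem]
          exact bGo_inv lines maxl matched (j + 1) acc hle h0
        · rw [if_pos ⟨hq, hmem, hb⟩, ← add_of_not_mem acc _ hmem]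
          exact bGo_inv lines maxl matched (j + 1) (PySem.Set.add acc lines[j])
            (by rw [add_of_not_mem acc _ hmem]; simp; omega) h0
      · rw [if_neg hk]
        have hcond : ¬ (PySem.Str.strip lines[j] ≠ "" ∧ lines[j] ∉ acc ∧ bHit matched j = true) := by
          intro ⟨h1, _, h3⟩
          apply hk
          have hq1 : qIB lines j = true := by
            unfold qIB
            rw [getD_eq_getElem' lines j h]
            exact decide_eq_true h1
          simp [hq1, h3]
        rw [if_neg hcond]
        have : PySem.Set.update acc [] = acc := rfl
        rw [this]
        exact bGo_inv lines maxl matched (j + 1) acc hle h0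
  · rw [bGo, dif_neg h]
    have : tStr lines matched j = [] := by
      unfold tStr
      rw [Nat.sub_eq_zero_of_le (by omega)]
      rfl
    rw [this, List.take_of_length_le]
    · rfl
    · exact hle
termination_by lines.length - j

-- ---------- covB facts ----------
theorem foldr_max_ge (lines : List String) (l : List Nat) (k : Nat) (hk : k ∈ l) :
    hiB lines k ≤ l.foldr (fun k r => max (hiB lines k) r) 0 := by
  induction l with
  | nil => cases hk
  | cons x xs ih =>
      rcases List.mem_cons.mp hk with h | h
      · subst h; simp
      · simp only [List.foldr_cons]
        exact le_trans (ih h) (le_max_right _ _)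

theorem foldr_max_le (lines : List String) (l : List Nat) (c : Nat)
    (h : ∀ k ∈ l, hiB lines k ≤ c) :
    l.foldr (fun k r => max (hiB lines k) r) 0 ≤ c := by
  induction l with
  | nil => simp
  | cons x xs ih =>
      simp only [List.foldr_cons]
      exact max_le (h x (by simp)) (ih (fun k hk => h k (by simp [hk])))

theorem exists_of_lt_foldr_max (lines : List String) (l : List Nat) (j : Nat)
    (h : j < l.foldr (fun k r => max (hiB lines k) r) 0) :
    ∃ k ∈ l, j < hiB lines k := by
  induction l with
  | nil => simp at h
  | cons x xs ih =>
      simp only [List.foldr_cons] at h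
      rcases lt_max_iff.mp h with h | h
      · exact ⟨x, by simp, h⟩
      · obtain ⟨k, hk, hj⟩ := ih h
        exact ⟨k, by simp [hk], hj⟩

theorem covB_lt_Hm (lines : List String) (i j : Nat) (h : covB lines i j = true) :
    j < HmB lines i := by
  unfold covB at h
  obtain ⟨i', hi', hp⟩ := List.any_eq_true.mp h
  have hm : (mB lines i' = true ∧ i' ≤ j + 1) ∧ j < hiB lines i' := by simpa using hp
  have hmem : i' ∈ (List.range i).filter (mB lines) :=
    List.mem_filter.mpr ⟨hi', hm.1.1⟩
  exact lt_of_lt_of_le hm.2 (foldr_max_ge lines _ i' hmem)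

theorem covB_of_lt_Hm (lines : List String) (i j : Nat)
    (h1 : i - 1 ≤ j) (h2 : j < HmB lines i) : covB lines i j = true := by
  unfold HmB at h2
  obtain ⟨k, hk, hj⟩ := exists_of_lt_foldr_max lines _ j h2
  have hk' := List.mem_filter.mp hk
  have hki : k < i := List.mem_range.mp hk'.1
  unfold covB
  refine List.any_eq_true.mpr ⟨k, List.mem_range.mpr hki, ?_⟩
  have : k - 1 ≤ j := by omega
  simp [hk'.2, this, hj]

theorem covB_succ (lines : List String) (i j : Nat) :
    covB lines (i + 1) j
      = (covB lines i j || (mB lines i && decide (i - 1 ≤ j) && decide (j < hiB lines i))) := by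
  unfold covB
  rw [List.range_succ, List.any_append]
  simp

theorem Hm_le_hi (lines : List String) (i : Nat) : HmB lines i ≤ hiB lines i := by
  unfold HmB
  refine foldr_max_le lines _ _ ?_
  intro k hk
  have := List.mem_range.mp (List.mem_filter.mp hk).1
  unfold hiB
  omega

-- ---------- the interval-union lemma ----------
theorem range'_split (a m n : Nat) :
    List.range' a (m + n) = List.range' a m ++ List.range' (a + m) n := by
  have := List.range'_append (s := a) (m := m) (n := n) (step := 1)
  simpa using this.symm

theorem idx_block (lines : List String) (i : Nat) (hi : i < lines.length)
    (hm : mB lines i = true) :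
    PySem.Set.update ((List.range lines.length).filter (fun j => covB lines i j)) (ivalB lines i)
      = (List.range lines.length).filter (fun j => covB lines (i + 1) j) := by
  set n := lines.length with hn
  set lo := i - 1 with hlo
  set H := HmB lines i with hH
  set mid := max lo H with hmid
  have hlohi : lo < hiB lines i := by unfold hiB; omega
  have hHhi : H ≤ hiB lines i := Hm_le_hi lines i
  have hmidhi : mid ≤ hiB lines i := by omega
  have hhin : hiB lines i ≤ n := by unfold hiB; omega
  -- split the window
  have hsplit : ivalB lines i
      = List.range' lo (mid - lo) ++ List.range' mid (hiB lines i - mid) := by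
    unfold ivalB
    rw [← hlo, show hiB lines i - lo = (mid - lo) + (hiB lines i - mid) by omega,
      range'_split, show lo + (mid - lo) = mid by omega]
  -- the prefix is already covered
  have hpre : ∀ x ∈ List.range' lo (mid - lo),
      x ∈ (List.range n).filter (fun j => covB lines i j) := by
    intro x hx
    have hx' := List.mem_range'_1.mp hx
    have hxH : x < H := by omega
    refine List.mem_filter.mpr ⟨List.mem_range.mpr (by omega), ?_⟩
    exact covB_of_lt_Hm lines i x (by omega) hxH
  -- the suffix is fresh
  have hsuf : ∀ x ∈ List.range' mid (hiB lines i - mid),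
      x ∉ (List.range n).filter (fun j => covB lines i j) := by
    intro x hx hmem
    have hx' := List.mem_range'_1.mp hx
    have := covB_lt_Hm lines i x (List.mem_filter.mp hmem).2
    omega
  rw [hsplit, PySem.Set.update_append, update_of_forall_mem _ _ hpre,
    PySem.Set.update_eq_append_of_disjoint _ _ List.nodup_range' hsuf]
  -- now prove the filter decomposition
  have e1 := range'_split 0 mid (n - mid)
  rw [show mid + (n - mid) = n by omega] at e1
  simp only [Nat.zero_add] at e1
  have e2 := range'_split mid (hiB lines i - mid) (n - hiB lines i)
  rw [show (hiB lines i - mid) + (n - hiB lines i) = n - mid by omega,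
    show mid + (hiB lines i - mid) = hiB lines i by omega] at e2
  have hrange : List.range n
      = List.range' 0 mid ++ List.range' mid (hiB lines i - mid)
        ++ List.range' (hiB lines i) (n - hiB lines i) := by
    rw [List.range_eq_range', e1, e2, ← List.append_assoc]
  have hcov : ∀ x, covB lines (i + 1) x
      = (covB lines i x || (decide (lo ≤ x) && decide (x < hiB lines i))) := by
    intro x
    rw [covB_succ, hm]
    simp [hlo]
  rw [hrange]
  simp only [List.filter_append]
  -- segment 1
  have hseg1 : (List.range' 0 mid).filter (fun j => covB lines (i + 1) j)
      = (List.range' 0 mid).filter (fun j => covB lines i j) := by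
    refine List.filter_congr ?_
    intro x hx
    have hx' := List.mem_range'_1.mp hx
    rw [hcov]
    by_cases hc : covB lines i x = true
    · simp [hc]
    · have : ¬ (lo ≤ x ∧ x < hiB lines i) := by
        intro ⟨ha, hb⟩
        refine hc (covB_of_lt_Hm lines i x ha ?_)
        omega
      simp only [Bool.eq_false_iff.mpr hc] at *
      by_cases hlx : lo ≤ x
      · have : ¬ x < hiB lines i → (decide (lo ≤ x) && decide (x < hiB lines i)) = false := by
          intro hb; simp [hb]
        simp [hc, this (fun hb => ‹¬ (lo ≤ x ∧ x < hiB lines i)› ⟨hlx, hb⟩)]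
      · simp [hc, hlx]
  -- segment 2
  have hseg2 : (List.range' mid (hiB lines i - mid)).filter (fun j => covB lines (i + 1) j)
      = List.range' mid (hiB lines i - mid) := by
    refine List.filter_eq_self.mpr ?_
    intro x hx
    have hx' := List.mem_range'_1.mp hx
    rw [hcov]
    have h1 : lo ≤ x := by omega
    have h2 : x < hiB lines i := by omega
    simp [h1, h2]
  -- segment 3
  have hseg3 : (List.range' (hiB lines i) (n - hiB lines i)).filter (fun j => covB lines (i + 1) j)
      = [] := by
    simp only [List.filter_eq_nil_iff]
    intro x hx
    have hx' := List.mem_range'_1.mp hx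
    rw [hcov]
    intro hc
    have hc' : covB lines i x = true ∨ (lo ≤ x ∧ x < hiB lines i) := by simpa using hc
    rcases hc' with hc | hc
    · have := covB_lt_Hm lines i x hc; omega
    · omega
  have hseg2' : (List.range' mid (hiB lines i - mid)).filter (fun j => covB lines i j) = [] := by
    simp only [List.filter_eq_nil_iff]
    intro x hx hc
    have hx' := List.mem_range'_1.mp hx
    have := covB_lt_Hm lines i x hc
    omega
  have hseg3' : (List.range' (hiB lines i) (n - hiB lines i)).filter (fun j => covB lines i j) = [] := by
    simp only [List.filter_eq_nil_iff]
    intro x hx hc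
    have hx' := List.mem_range'_1.mp hx
    have := covB_lt_Hm lines i x hc
    omega
  rw [hseg1, hseg2, hseg3, hseg2', hseg3']
  simp

theorem idx_step (lines : List String) (i : Nat) (hle : i ≤ lines.length) :
    PySem.Set.update ((List.range lines.length).filter (fun j => covB lines i j)) (idxFrom lines i)
      = (List.range lines.length).filter (fun j => covB lines lines.length j) := by
  by_cases h : i < lines.length
  · have hn : lines.length - i = (lines.length - (i + 1)) + 1 := by omega
    unfold idxFrom
    rw [hn, List.range'_succ, List.flatMap_cons]
    rw [PySem.Set.update_append]
    have hrec := idx_step lines (i + 1) (by omega)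
    unfold idxFrom at hrec
    by_cases hm : mB lines i = true
    · rw [if_pos hm, idx_block lines i h hm]
      exact hrec
    · rw [if_neg hm]
      have hsame : (List.range lines.length).filter (fun j => covB lines i j)
          = (List.range lines.length).filter (fun j => covB lines (i + 1) j) := by
        refine (List.filter_congr ?_).symm
        intro x _
        rw [covB_succ]
        have hm' : mB lines i = false := by
          cases hval : mB lines i
          · rfl
          · exact absurd hval hm
        simp [hm']
      have hnil : PySem.Set.update ((List.range lines.length).filter (fun j => covB lines i j)) [] = (List.range lines.length).filter (fun j => covB lines i j) := rfl
      rw [hnil, hsame]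
      exact hrec
  · have hi : i = lines.length := by omega
    subst hi
    unfold idxFrom
    rw [Nat.sub_self]
    rfl
termination_by lines.length - i

theorem idx_dedup (lines : List String) :
    PySem.Set.ofList (idxFrom lines 0)
      = (List.range lines.length).filter (fun j => covB lines lines.length j) := by
  have h0 : (List.range lines.length).filter (fun j => covB lines 0 j) = [] := by
    simp only [List.filter_eq_nil_iff]
    intro x _ hc
    unfold covB at hc
    simp at hc
  have := idx_step lines 0 (by omega)
  rw [h0] at this
  rw [← this]
  rfl

-- ---------- bHit is covB ----------
theorem mem_bMatched (lines : List String) (x : Int) :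
    x ∈ bMatched lines
      ↔ ∃ k : Nat, k < lines.length ∧ mB lines k = true ∧ x = (k : Int) := by
  unfold bMatched
  rw [PySem.Set.mem_ofList, List.mem_filterMap]
  constructor
  · rintro ⟨p, hp, hf⟩
    obtain ⟨k, hk, rfl⟩ := (PySem.List.mem_enumerate_iff _ _ _).mp hp
    by_cases hm : pvMatch lines[k]
    · refine ⟨k, hk, ?_, ?_⟩
      · unfold mB; rw [getD_eq_getElem' lines k hk]; exact hm
      · have := Option.some.inj (by simpa [hm] using hf)
        omega
    · simp [hm] at hf
  · rintro ⟨k, hk, hm, rfl⟩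
    refine ⟨((0 : Int) + k, lines[k]), ?_, ?_⟩
    · exact (PySem.List.mem_enumerate_iff _ _ _).mpr ⟨k, hk, rfl⟩
    · unfold mB at hm
      rw [getD_eq_getElem' lines k hk] at hm
      simp [hm]

theorem bHit_eq_covB (lines : List String) (j : Nat) (h : j < lines.length) :
    bHit (bMatched lines) j = covB lines lines.length j := by
  apply Bool.eq_iff_iff.mpr
  unfold bHit
  constructor
  · intro hb
    have hd : ¬ (PySem.Set.isdisjoint (bMatched lines)
        (PySem.List.pyRange ((j : Int) - 2) ((j : Int) + 2) 1) = true) := by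
      intro hv
      rw [hv] at hb
      simp at hb
    have hex : ∃ x ∈ bMatched lines, x ∈ PySem.List.pyRange ((j : Int) - 2) ((j : Int) + 2) 1 := by
      by_contra hall
      push_neg at hall
      exact hd ((PySem.Set.isdisjoint_iff _ _).mpr hall)
    obtain ⟨x, hxm, hxr⟩ := hex
    obtain ⟨k, hk, hmk, rfl⟩ := (mem_bMatched lines x).mp hxm
    have hr := PySem.List.mem_pyRange_one.mp hxr
    unfold covB
    refine List.any_eq_true.mpr ⟨k, List.mem_range.mpr hk, ?_⟩
    have h1 : k - 1 ≤ j := by omega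
    have h2 : j < hiB lines k := by unfold hiB; omega
    simp [hmk, h1, h2]
  · intro hc
    unfold covB at hc
    obtain ⟨k, hkr, hp⟩ := List.any_eq_true.mp hc
    have hk : k < lines.length := List.mem_range.mp hkr
    have hm : (mB lines k = true ∧ k ≤ j + 1) ∧ j < hiB lines k := by simpa using hp
    have hhi : j < hiB lines k := hm.2
    unfold hiB at hhi
    have hmem : (k : Int) ∈ PySem.List.pyRange ((j : Int) - 2) ((j : Int) + 2) 1 :=
      PySem.List.mem_pyRange_one.mpr (by constructor <;> omega)
    have hd : PySem.Set.isdisjoint (bMatched lines)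
        (PySem.List.pyRange ((j : Int) - 2) ((j : Int) + 2) 1) = false := by
      cases hval : PySem.Set.isdisjoint (bMatched lines)
          (PySem.List.pyRange ((j : Int) - 2) ((j : Int) + 2) 1)
      · rfl
      · exact absurd hmem ((PySem.Set.isdisjoint_iff _ _).mp hval _
          ((mem_bMatched lines _).mpr ⟨k, hk, hm.1.1, rfl⟩))
    simp [hd]

-- ---------- final stream equality ----------
theorem stream_dedup_eq (lines : List String) :
    PySem.Set.ofList (aStr lines 0 lines)
      = PySem.Set.ofList (tStr lines (bMatched lines) 0) := by
  have h0 : aStr lines 0 lines = aStr lines 0 (lines.drop 0) := by rw [List.drop_zero]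
  rw [h0, aStr_eq_idx,
    ← ofList_map_ofList (getB lines) ((idxFrom lines 0).filter (qIB lines)),
    ofList_filter (qIB lines) (idxFrom lines 0), idx_dedup, List.filter_filter]
  have hcong : (List.range lines.length).filter
        (fun a => qIB lines a && covB lines lines.length a)
      = (List.range lines.length).filter
        (fun k => qIB lines k && bHit (bMatched lines) k) := by
    refine List.filter_congr ?_
    intro x hx
    rw [bHit_eq_covB lines x (List.mem_range.mp hx)]
  rw [hcong]
  unfold tStr
  rw [Nat.sub_zero, ← List.range_eq_range']

-- ===== VERDICT (by name: the statement is the Claim_ definition above) =====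
theorem extract_errors_py_spec : Claim_equal_extract_errors_py := by
  intro output maxl _ hpre
  unfold Spec_extract_errors_py extract_errors_py extract_errors_py_alt
  by_cases h0 : output = ""
  · simp [h0]
  · simp only [h0, if_neg, not_false_iff]
    set lines := pvSplit output with hlines
    by_cases hpos : 0 ≤ maxl
    swap
    · -- negative cap: B stops at once; A stops after at most the first line's window (≤ 3 lines),
      -- which a cap ≤ -3 slices away entirely; Pre_ supplies one of the two cases
      cases hl : lines with
      | nil =>
          rw [hl] at *
          rw [show aGo [] maxl 0 [] = [] by rw [aGo]; simp,
            show bGo [] maxl (bMatched []) 0 [] = [] by rw [bGo]; simp]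
          simp [PySem.List.slice]
      | cons l ls =>
          rw [← hl]
          have hlen : 0 < lines.length := by rw [hl]; simp
          have hget : lines[0] = l := by simp [hl]
          have hB : bGo lines maxl (bMatched lines) 0 [] = [] := by
            rw [bGo, dif_pos hlen, if_pos (by simp; omega)]
          have hstep : aGo lines maxl 0 []
              = (if pvMatch l then
                  PySem.Set.update [] ((pvWindow lines 0).filter (fun c => PySem.Str.strip c ≠ ""))
                 else []) := by
            rw [aGo, dif_pos hlen]
            simp only [hget]
            by_cases hm : pvMatch l
            · rw [if_pos hm, if_pos hm, aFold_eq_update]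
              rw [if_pos ?_]
              have h1 : (0:Int) ≤ ((PySem.Set.update []
                  ((pvWindow lines 0).filter (fun c => PySem.Str.strip c ≠ ""))).length : Int) :=
                Int.natCast_nonneg _
              omega
            · rw [if_neg hm, if_neg hm, if_pos (by simp; omega)]
          rcases hpre with hpre | hpre | hpre
          · exact absurd hpre hpos
          · -- max_lines ≤ -3: A's absorbed window has at most 3 lines, the slice drops them all
            have hw : (pvWindow lines 0).length ≤ 3 := by
              rw [window_eq_map lines 0 hlen]
              unfold ivalB hiB
              simp
            have hacc : (aGo lines maxl 0 []).length ≤ 3 := by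
              rw [hstep]
              by_cases hm : pvMatch l
              · rw [if_pos hm]
                calc (PySem.Set.update []
                      ((pvWindow lines 0).filter (fun c => PySem.Str.strip c ≠ ""))).length
                    = (PySem.Set.ofList
                      ((pvWindow lines 0).filter (fun c => PySem.Str.strip c ≠ ""))).length := rfl
                  _ ≤ ((pvWindow lines 0).filter (fun c => PySem.Str.strip c ≠ "")).length :=
                      PySem.Set.length_ofList_le _
                  _ ≤ (pvWindow lines 0).length := List.length_filter_le _ _
                  _ ≤ 3 := hw
              · rw [if_neg hm]; simp
            have hk : maxl = -(((-maxl).toNat : Nat) : Int) := by omega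
            have hk0 : 0 < (-maxl).toNat := by omega
            have hsl : PySem.List.slice (aGo lines maxl 0 []) none (some maxl) = [] := by
              rw [hk] at hacc ⊢
              rw [PySem.List.slice_to_neg_natCast _ _ hk0,
                show (aGo lines (-(((-maxl).toNat : Nat) : Int)) 0 []).length - (-maxl).toNat = 0
                  by omega, List.take_zero]
            rw [hsl, hB]
          · -- the first line does not match: A also collects nothing before breaking
            have hml : pvMatch l = false := by
              rw [← hlines, hl] at hpre
              simpa using hpre
            rw [hstep, if_neg (by rw [hml]; simp), hB]
            simp [PySem.List.slice]
    rw [PySem.List.slice_to _ hpos]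
    rw [bGo_inv lines maxl (bMatched lines) 0 [] (by simp) hpos]
    by_cases hz : 0 < maxl
    · have hA := main_inv lines maxl 0 [] (by simpa using hz)
      rw [hA, List.drop_zero]
      have : (PySem.Set.update [] (aStr lines 0 lines))
          = (PySem.Set.update [] (tStr lines (bMatched lines) 0)) := by
        have := stream_dedup_eq lines
        simpa [PySem.Set.update_empty] using this
      rw [this]
    · have h00 : maxl = 0 := le_antisymm (by omega) hpos
      subst h00
      simp
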